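-- pv_equiv track=rewrite | github.com/dalemyers/Advent-of-Code | aoc/year_2015/day_19.py | parse_molecule
-- ===== SOURCE A (Python) =====
-- def parse_molecule(string):
--     output = []
--     buffer = ""
--     for character in string:
--         if character.lower() == character:
--             buffer += character
--         else:
--             output.append(buffer)
--             buffer = character
--     if buffer != "":
--         output.append(buffer)
--     return [m for m in output if len(m) > 0]
-- ===== SOURCE B (Python) =====
-- def parse_molecule(string):
--     # Cursor/scan decomposition: for each token, take the current char and
--     # extend over the following run of chars with c.lower() == c, then slice.
--     # Never creates empty pieces, so no final filter is needed.
--     tokens = []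
--     i, n = 0, len(string)
--     while i < n:
--         j = i + 1
--         while j < n and string[j].lower() == string[j]:
--             j += 1
--         tokens.append(string[i:j])
--         i = j
--     return tokens
-- ===== Notes on version B (the rewrite author's own statement) =====
-- stated objective: simpler
-- what changed: Replaces A's accumulator-buffer fold with trailing flush and a final empty-filter pass by an index-scan that cuts the string at each non-lowercase character and slices tokens out directly, never producing empty pieces.
import Mathlib
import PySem

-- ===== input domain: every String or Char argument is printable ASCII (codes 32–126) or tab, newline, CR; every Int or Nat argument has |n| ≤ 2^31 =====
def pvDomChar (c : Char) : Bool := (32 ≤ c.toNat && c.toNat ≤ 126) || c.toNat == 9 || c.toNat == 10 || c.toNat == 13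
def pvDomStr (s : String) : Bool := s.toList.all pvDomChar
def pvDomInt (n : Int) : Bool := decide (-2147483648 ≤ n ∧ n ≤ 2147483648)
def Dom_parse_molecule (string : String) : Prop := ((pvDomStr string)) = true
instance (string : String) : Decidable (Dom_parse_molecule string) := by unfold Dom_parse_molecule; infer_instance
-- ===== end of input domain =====

-- B replaces A's buffer-accumulator fold (with trailing flush and a final empty-filter pass)
-- by an index scan that cuts at each non-lowercase character and slices tokens out directly.

-- ===== PORT A =====
-- one step of A's for-loop; `character.lower() == character` on a 1-char string is exactly
-- `lowerChar c == c` on its character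
def stepParse (st : List (List Char) × List Char) (c : Char) : List (List Char) × List Char :=
  if PySem.Chars.lowerChar c == c then (st.1, st.2 ++ [c]) else (st.1 ++ [st.2], [c])

def parse_molecule (string : String) : List String :=
  let st := string.toList.foldl stepParse ([], [])
  let out := if st.2 ≠ [] then st.1 ++ [st.2] else st.1
  (out.filter (fun m => decide (0 < m.length))).map String.mk

-- ===== PORT B =====
-- Source B's outer while-loop: emit one token per iteration; the inner while-loop
-- extending j over the run of chars with c.lower() == c is exactly takeWhile/dropWhile
def scanTokens : List Char → List (List Char)
  | [] => []
  | c :: t =>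
      (c :: t.takeWhile (fun d => PySem.Chars.lowerChar d == d)) ::
        scanTokens (t.dropWhile (fun d => PySem.Chars.lowerChar d == d))
  termination_by l => l.length
  decreasing_by
    simp only [List.length_cons]
    exact Nat.lt_succ_of_le (List.length_dropWhile_le _ _)

def parse_molecule_alt (string : String) : List String :=
  (scanTokens string.toList).map String.mk

-- ===== PRECONDITION & SPEC =====
def Spec_parse_molecule (string : String) (out : List String) : Prop := out = parse_molecule_alt string
instance (string : String) (out : List String) : Decidable (Spec_parse_molecule string out) := by unfold Spec_parse_molecule; infer_instance

-- ===== CLAIM (what is proved, stated in full; the proofs are below) =====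
def Claim_equal_parse_molecule : Prop := ∀ (string : String), Dom_parse_molecule string → Spec_parse_molecule string (parse_molecule string)

-- ===== LEMMAS AND PROOFS =====

-- proof-only characterisation of A's remaining output given the current buffer
def Gtok (buf : List Char) : List Char → List (List Char)
  | [] => if buf = [] then [] else [buf]
  | c :: t =>
      if PySem.Chars.lowerChar c == c then Gtok (buf ++ [c]) t
      else (if buf = [] then [] else [buf]) ++ Gtok [c] t

theorem filter_single (buf : List Char) :
    List.filter (fun m => decide (0 < m.length)) [buf] = if buf = [] then [] else [buf] := by
  cases buf <;> simp [List.filter]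

theorem A_main (l : List Char) (out : List (List Char)) (buf : List Char) :
    ((if (l.foldl stepParse (out, buf)).2 ≠ [] then
        (l.foldl stepParse (out, buf)).1 ++ [(l.foldl stepParse (out, buf)).2]
      else (l.foldl stepParse (out, buf)).1).filter (fun m => decide (0 < m.length)))
    = out.filter (fun m => decide (0 < m.length)) ++ Gtok buf l := by
  induction l generalizing out buf with
  | nil =>
      simp only [List.foldl, Gtok]
      by_cases h : buf = [] <;> simp [h, List.filter_append, filter_single]
  | cons c t ih =>
      simp only [List.foldl, stepParse, Gtok]
      by_cases h : PySem.Chars.lowerChar c == c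
      · simp only [h, if_true]
        exact ih out (buf ++ [c])
      · simp only [h, if_false, Bool.false_eq_true]
        rw [ih (out ++ [buf]) [c], List.filter_append, filter_single, List.append_assoc]

theorem G_run (l : List Char) (buf : List Char) (hbuf : buf ≠ []) :
    Gtok buf l = (buf ++ l.takeWhile (fun d => PySem.Chars.lowerChar d == d)) ::
      scanTokens (l.dropWhile (fun d => PySem.Chars.lowerChar d == d)) := by
  induction l generalizing buf with
  | nil => simp [Gtok, hbuf, scanTokens]
  | cons c t ih =>
      by_cases h : (PySem.Chars.lowerChar c == c) = true
      · rw [show Gtok buf (c :: t) = Gtok (buf ++ [c]) t from by simp [Gtok, h],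
          ih (buf ++ [c]) (by simp)]
        simp [h]
      · rw [Bool.not_eq_true] at h
        rw [show Gtok buf (c :: t) = [buf] ++ Gtok [c] t from by simp [Gtok, h, hbuf],
          ih [c] (by simp)]
        simp [h, scanTokens]

theorem G_nil (l : List Char) : Gtok [] l = scanTokens l := by
  cases l with
  | nil => simp [Gtok, scanTokens]
  | cons c t =>
      by_cases h : (PySem.Chars.lowerChar c == c) = true
      · rw [show Gtok [] (c :: t) = Gtok [c] t from by simp [Gtok, h],
          G_run t [c] (by simp), scanTokens]
        simp
      · rw [Bool.not_eq_true] at h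
        rw [show Gtok [] (c :: t) = Gtok [c] t from by simp [Gtok, h],
          G_run t [c] (by simp), scanTokens]
        simp

-- ===== VERDICT (by name: the statement is the Claim_ definition above) =====
theorem parse_molecule_spec : Claim_equal_parse_molecule := by
  intro s _
  unfold Spec_parse_molecule
  show (let st := s.toList.foldl stepParse ([], [])
        let out := if st.2 ≠ [] then st.1 ++ [st.2] else st.1
        (out.filter (fun m => decide (0 < m.length))).map String.mk) = _
  simp only [parse_molecule_alt]
  rw [show (let st := s.toList.foldl stepParse ([], [])
        let out := if st.2 ≠ [] then st.1 ++ [st.2] else st.1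
        (out.filter (fun m => decide (0 < m.length))).map String.mk)
      = ((if (s.toList.foldl stepParse ([], [])).2 ≠ [] then
            (s.toList.foldl stepParse ([], [])).1 ++ [(s.toList.foldl stepParse ([], [])).2]
          else (s.toList.foldl stepParse ([], [])).1).filter
            (fun m => decide (0 < m.length))).map String.mk from rfl,
    A_main s.toList [] [], G_nil]
  simp [List.filter]
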